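-- pv_equiv track=rewrite | github.com/acarrillo2/CodingProblems | common_sense_guide_dsa/chapter12.py | golomb_memoization
-- ===== SOURCE A (Python) =====
-- def golomb_memoization(n, map):
--     if n == 1:
--         return 1
--     if n in map:
--         return map[n]
--     golomb_value = 1 + golomb_memoization(n - golomb_memoization(golomb_memoization(n - 1, map), map), map)
--     map[n] = golomb_value
--     return golomb_value
-- ===== SOURCE B (Python) =====
-- def golomb_memoization(n, map):
--     if n == 1:
--         return 1
--     if n in map:
--         return map[n]
--
--     def get(k):
--         return 1 if k == 1 else map[k]
--
--     for i in range(2, n + 1):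
--         if i not in map:
--             map[i] = 1 + get(i - get(get(i - 1)))
--     return map[n]
-- ===== Notes on version B (the rewrite author's own statement) =====
-- stated objective: alternative
-- what changed: Replaces A's triple-nested recursive memoization with an iterative bottom-up fill of the memo table from 2 up to n (same guards, constant stack instead of O(n) recursion depth).
-- outside the precondition, e.g. on golomb_memoization(5, {2: 9, 4: 1}): A returns 2, B raises KeyError
import Mathlib
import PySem

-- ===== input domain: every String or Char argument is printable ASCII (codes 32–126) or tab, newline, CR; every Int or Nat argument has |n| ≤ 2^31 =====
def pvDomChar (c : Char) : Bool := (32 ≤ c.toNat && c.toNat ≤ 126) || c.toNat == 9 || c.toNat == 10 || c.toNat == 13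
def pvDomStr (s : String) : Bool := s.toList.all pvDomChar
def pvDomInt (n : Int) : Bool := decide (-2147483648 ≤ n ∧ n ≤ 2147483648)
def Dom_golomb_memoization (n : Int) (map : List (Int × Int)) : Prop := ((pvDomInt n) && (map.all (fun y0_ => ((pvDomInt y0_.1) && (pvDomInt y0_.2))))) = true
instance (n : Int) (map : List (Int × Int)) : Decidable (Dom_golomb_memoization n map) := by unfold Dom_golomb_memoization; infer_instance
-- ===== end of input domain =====

-- B replaces A's triple-nested recursive memoization by an iterative bottom-up table fill (same return
-- value; both A and B mutate the `map` argument as a cache — the equivalence proved here is about the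
-- RETURN value only, and the cached entries the two leave behind may differ).

-- ===== PORT A =====
-- Literal port of A's recursion; the Nat fuel only makes the recursion structural (inside
-- Pre_ the proof shows fuel n.toNat+1 is never exhausted), it is not part of A's algorithm.
def goA : Nat → Int → PySem.Dict Int Int → Option (Int × PySem.Dict Int Int)
  | 0, _, _ => none
  | f + 1, n, d =>
    if n = 1 then some (1, d)
    else
      match d.get? n with
      | some v => some (v, d)                                     -- if n in map: return map[n]
      | none =>
        match goA f (n - 1) d with                                -- golomb_memoization(n - 1, map)
        | none => none
        | some (a, d1) =>
          match goA f a d1 with                                   -- golomb_memoization(<that>, map)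
          | none => none
          | some (b, d2) =>
            match goA f (n - b) d2 with                           -- golomb_memoization(n - <that>, map)
            | none => none
            | some (c, d3) => some (1 + c, d3.insert n (1 + c))   -- map[n] = golomb_value

def golomb_memoization (n : Int) (map : List (Int × Int)) : Int :=
  match goA (n.toNat + 1) n (PySem.Dict.ofList map) with
  | some r => r.1
  | none => 0

-- ===== PORT B =====
-- get(k) = 1 if k == 1 else map[k]  (none = KeyError)
def getB (d : PySem.Dict Int Int) (k : Int) : Option Int :=
  if k = 1 then some 1 else d.get? k

-- one loop iteration: if i not in map: map[i] = 1 + get(i - get(get(i - 1)))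
def stepB (d : PySem.Dict Int Int) (i : Int) : Option (PySem.Dict Int Int) :=
  if d.contains i then some d
  else
    match getB d (i - 1) with
    | none => none
    | some x1 =>
      match getB d x1 with
      | none => none
      | some x2 =>
        match getB d (i - x2) with
        | none => none
        | some x3 => some (d.insert i (1 + x3))

def golomb_memoization_alt (n : Int) (map : List (Int × Int)) : Int :=
  let d0 := PySem.Dict.ofList map
  if n = 1 then 1
  else
    match d0.get? n with
    | some v => v
    | none =>
      match (PySem.List.pyRange 2 (n + 1)).foldl (fun od i => od.bind (fun d => stepB d i)) (some d0) with
      | some d => (d.get? n).getD 0   -- return map[n] (present whenever the loop finished)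
      | none => 0

-- ===== PRECONDITION & SPEC =====
-- Pre_ admits any n that is a key of the map (both programs return map[n] at once, for n = 1 the
-- constant 1) and otherwise the inputs on which A's recursion returns normally, excluding: (a) n < 1
-- (A recurses without bound: RecursionError); (b) maps holding an entry (k, v) with 2 ≤ k ≤ n and v
-- outside [1, k] — A's lazy recursion then diverges in general, and on the rare such maps where the
-- errant entry is never read A returns while B's bottom-up fill, which reads every index in [2, n],
-- raises KeyError (see the cite in claim.json).
def Pre_golomb_memoization (n : Int) (map : List (Int × Int)) : Prop :=
  n ∈ map.map Prod.fst ∨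
    (1 ≤ n ∧ ∀ p ∈ map, 2 ≤ p.1 → p.1 ≤ n → 1 ≤ p.2 ∧ p.2 ≤ p.1)

instance (n : Int) (map : List (Int × Int)) : Decidable (Pre_golomb_memoization n map) := by
  unfold Pre_golomb_memoization; infer_instance

def pvWitness_golomb_memoization : Int × (List (Int × Int)) := (5, [(2, 2), (7, 3)])

def Spec_golomb_memoization (n : Int) (map : List (Int × Int)) (out : Int) : Prop := out = golomb_memoization_alt n map
instance (n : Int) (map : List (Int × Int)) (out : Int) : Decidable (Spec_golomb_memoization n map out) := by unfold Spec_golomb_memoization; infer_instance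

-- ===== CLAIM (what is proved, stated in full; the proofs are below) =====
def Claim_equal_golomb_memoization : Prop := ∀ (n : Int) (map : List (Int × Int)), Dom_golomb_memoization n map → Pre_golomb_memoization n map → Spec_golomb_memoization n map (golomb_memoization n map)

-- ===== LEMMAS AND PROOFS =====

-- Pure reference value: the Golomb recursion read off the ORIGINAL dictionary only (no memo threading).
def Vg (d0 : PySem.Dict Int Int) : Nat → Int → Option Int
  | 0, _ => none
  | f + 1, m =>
    if m = 1 then some 1
    else
      match d0.get? m with
      | some v => some v
      | none =>
        match Vg d0 f (m - 1) with
        | none => none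
        | some a =>
          match Vg d0 f a with
          | none => none
          | some b =>
            match Vg d0 f (m - b) with
            | none => none
            | some c => some (1 + c)

-- every original entry at a key in [2, n] is bounded by its key
def GoodD (d0 : PySem.Dict Int Int) (n : Int) : Prop :=
  ∀ k v, d0.get? k = some v → 2 ≤ k → k ≤ n → 1 ≤ v ∧ v ≤ k

-- the current memo dictionary agrees with the original, except for cached reference values at keys ≥ 2
def ConsD (d0 d : PySem.Dict Int Int) : Prop :=
  ∀ k, d.get? k = d0.get? k ∨
    (∃ v f, d.get? k = some v ∧ d0.get? k = none ∧ 2 ≤ k ∧ Vg d0 f k = some v)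

-- every key in [2, j] is present
def FullD (d : PySem.Dict Int Int) (j : Int) : Prop :=
  ∀ k, 2 ≤ k → k ≤ j → (d.get? k).isSome = true

theorem Vg_mono (d0 : PySem.Dict Int Int) : ∀ {f f' : Nat} {m v : Int}, f ≤ f' → Vg d0 f m = some v → Vg d0 f' m = some v := by
  intro f
  induction f with
  | zero => intro f' m v _ h; simp [Vg] at h
  | succ f ih =>
    intro f' m v hle h
    obtain ⟨f'', rfl⟩ : ∃ f'', f' = f'' + 1 := ⟨f' - 1, by omega⟩
    have hle' : f ≤ f'' := by omega
    by_cases hm : m = 1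
    · simpa [Vg, hm] using h
    · simp only [Vg, if_neg hm] at h ⊢
      cases hg : d0.get? m with
      | some w => rw [hg] at h; exact h
      | none =>
        rw [hg] at h
        cases h1 : Vg d0 f (m - 1) with
        | none => simp [h1] at h
        | some a =>
          simp [h1] at h
          have e1 := ih hle' h1
          cases h2 : Vg d0 f a with
          | none => simp [h2] at h
          | some b =>
            simp [h2] at h
            have e2 := ih hle' h2
            cases h3 : Vg d0 f (m - b) with
            | none => simp [h3] at h
            | some c =>
              simp [h3] at h
              have e3 := ih hle' h3
              simp [e1, e2, e3]
              omega

theorem Vg_det (d0 : PySem.Dict Int Int) {f f' : Nat} {m v v' : Int}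
    (h : Vg d0 f m = some v) (h' : Vg d0 f' m = some v') : v = v' := by
  rcases le_total f f' with hle | hle
  · have h2 := Vg_mono d0 hle h
    rw [h2] at h'; exact Option.some.inj h'
  · have h2 := Vg_mono d0 hle h'
    rw [h2] at h; exact (Option.some.inj h).symm

theorem Vg_of_get (d0 : PySem.Dict Int Int) (f : Nat) {k v : Int} (hk : 2 ≤ k) (h : d0.get? k = some v) :
    Vg d0 (f + 1) k = some v := by
  have hne : ¬ k = 1 := by omega
  simp only [Vg, if_neg hne, h]

theorem Vg_one (d0 : PySem.Dict Int Int) (f : Nat) : Vg d0 (f + 1) 1 = some 1 := by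
  simp [Vg]

theorem lookup_Vg {d0 d : PySem.Dict Int Int} (hc : ConsD d0 d) {k v : Int}
    (h : d.get? k = some v) (hk : 2 ≤ k) : ∃ f, Vg d0 f k = some v := by
  rcases hc k with heq | ⟨w, f, hw, _, _, hv⟩
  · rw [heq] at h; exact ⟨0 + 1, Vg_of_get d0 0 hk h⟩
  · rw [hw] at h
    injection h with h'
    subst h'
    exact ⟨f, hv⟩

theorem Vg_bounds (d0 : PySem.Dict Int Int) (n : Int) (hg : GoodD d0 n) :
    ∀ F : Nat, ∀ m : Int, m.toNat ≤ F → 1 ≤ m → m ≤ n →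
      ∃ v, Vg d0 m.toNat m = some v ∧ 1 ≤ v ∧ v ≤ m := by
  intro F
  induction F with
  | zero => intro m hF h1 _; exfalso; omega
  | succ F ih =>
    intro m hF h1 hn
    by_cases hm : m = 1
    · subst hm
      refine ⟨1, ?_, by norm_num, by norm_num⟩
      rw [show (1 : Int).toNat = 0 + 1 from rfl]
      exact Vg_one d0 0
    · have h2 : 2 ≤ m := by omega
      obtain ⟨t, ht⟩ : ∃ t, m.toNat = t + 1 := ⟨m.toNat - 1, by omega⟩
      rw [ht]
      cases hget : d0.get? m with
      | some v =>
        obtain ⟨hv1, hv2⟩ := hg m v hget h2 hn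
        exact ⟨v, by simp only [Vg, if_neg hm, hget], hv1, hv2⟩
      | none =>
        obtain ⟨a, ha, ha1, ha2⟩ := ih (m - 1) (by omega) (by omega) (by omega)
        obtain ⟨b, hb, hb1, hb2⟩ := ih a (by omega) (by omega) (by omega)
        obtain ⟨c, hc, hc1, hc2⟩ := ih (m - b) (by omega) (by omega) (by omega)
        have ha' : Vg d0 t (m - 1) = some a := by
          have : (m - 1).toNat ≤ t := by omega
          exact Vg_mono d0 this ha
        have hb' : Vg d0 t a = some b := Vg_mono d0 (by omega) hb
        have hc' : Vg d0 t (m - b) = some c := Vg_mono d0 (by omega) hc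
        refine ⟨1 + c, ?_, by omega, by omega⟩
        simp only [Vg, if_neg hm, hget, ha', hb', hc']

theorem Vg_val_bounds (d0 : PySem.Dict Int Int) (n : Int) (hg : GoodD d0 n) {m : Int}
    (h1 : 1 ≤ m) (hn : m ≤ n) {f : Nat} {v : Int} (h : Vg d0 f m = some v) : 1 ≤ v ∧ v ≤ m := by
  obtain ⟨w, hw, hw1, hw2⟩ := Vg_bounds d0 n hg m.toNat m le_rfl h1 hn
  have := Vg_det d0 h hw
  omega

theorem ConsD_insert {d0 d : PySem.Dict Int Int} (hc : ConsD d0 d) {m v : Int} {g : Nat}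
    (hm : 2 ≤ m) (h0 : d0.get? m = none) (hv : Vg d0 g m = some v) : ConsD d0 (d.insert m v) := by
  intro k
  by_cases hk : k = m
  · subst hk
    exact Or.inr ⟨v, g, PySem.Dict.get?_insert_self _ _ _, h0, hm, hv⟩
  · rw [PySem.Dict.get?_insert_of_ne _ _ hk]
    exact hc k

-- A's threaded recursion returns, and returns exactly a reference value, on any consistent memo state.
theorem A_sim (d0 : PySem.Dict Int Int) (n : Int) (hg : GoodD d0 n) :
    ∀ F : Nat, ∀ (m : Int) (f : Nat) (d : PySem.Dict Int Int),
      m.toNat ≤ F → m.toNat ≤ f → 1 ≤ m → m ≤ n → ConsD d0 d →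
      ∃ v d', goA (f + 1) m d = some (v, d') ∧ (∃ g, Vg d0 g m = some v) ∧ ConsD d0 d' := by
  intro F
  induction F with
  | zero => intro m f d hF hf h1 hn hc; exfalso; omega
  | succ F ih =>
    intro m f d hF hf h1 hn hc
    by_cases hm : m = 1
    · subst hm
      exact ⟨1, d, by simp [goA], ⟨0 + 1, Vg_one d0 0⟩, hc⟩
    · have h2 : 2 ≤ m := by omega
      cases hget : d.get? m with
      | some v =>
        exact ⟨v, d, by simp only [goA, if_neg hm, hget], lookup_Vg hc hget h2, hc⟩
      | none =>
        have h0 : d0.get? m = none := by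
          rcases hc m with heq | ⟨w, g, hw, _, _, _⟩
          · rw [← heq]; exact hget
          · rw [hw] at hget; simp at hget
        obtain ⟨f', rfl⟩ : ∃ f', f = f' + 1 := ⟨f - 1, by omega⟩
        obtain ⟨a, d1, hA1, ⟨g1, hv1⟩, hc1⟩ := ih (m - 1) f' d (by omega) (by omega) (by omega) (by omega) hc
        obtain ⟨ha1, ha2⟩ := Vg_val_bounds d0 n hg (by omega) (by omega) hv1
        obtain ⟨b, d2, hA2, ⟨g2, hv2⟩, hc2⟩ := ih a f' d1 (by omega) (by omega) (by omega) (by omega) hc1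
        obtain ⟨hb1, hb2⟩ := Vg_val_bounds d0 n hg (by omega) (by omega) hv2
        obtain ⟨c, d3, hA3, ⟨g3, hv3⟩, hc3⟩ := ih (m - b) f' d2 (by omega) (by omega) (by omega) (by omega) hc2
        obtain ⟨hcv1, hcv2⟩ := Vg_val_bounds d0 n hg (by omega) (by omega) hv3
        have hvm : Vg d0 (max g1 (max g2 g3) + 1) m = some (1 + c) := by
          have e1 : Vg d0 (max g1 (max g2 g3)) (m - 1) = some a := Vg_mono d0 (le_max_left _ _) hv1
          have e2 : Vg d0 (max g1 (max g2 g3)) a = some b :=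
            Vg_mono d0 (le_trans (le_max_left _ _) (le_max_right _ _)) hv2
          have e3 : Vg d0 (max g1 (max g2 g3)) (m - b) = some c :=
            Vg_mono d0 (le_trans (le_max_right _ _) (le_max_right _ _)) hv3
          simp only [Vg, if_neg hm, h0, e1, e2, e3]
        refine ⟨1 + c, d3.insert m (1 + c), ?_, ⟨max g1 (max g2 g3) + 1, hvm⟩, ConsD_insert hc3 h2 h0 hvm⟩
        rw [goA]
        simp only [if_neg hm, hget, hA1, hA2, hA3]

theorem getB_ok {d0 d : PySem.Dict Int Int} (hc : ConsD d0 d) {j k : Int} (hf : FullD d j)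
    (h1 : 1 ≤ k) (hj : k ≤ j) : ∃ x, getB d k = some x ∧ ∃ g, Vg d0 g k = some x := by
  by_cases hk : k = 1
  · subst hk; exact ⟨1, by simp [getB], 0 + 1, Vg_one d0 0⟩
  · have h2 : 2 ≤ k := by omega
    obtain ⟨x, hx⟩ := Option.isSome_iff_exists.mp (hf k h2 hj)
    exact ⟨x, by simpa [getB, hk] using hx, lookup_Vg hc hx h2⟩

theorem stepB_ok (d0 : PySem.Dict Int Int) (n : Int) (hg : GoodD d0 n) {d : PySem.Dict Int Int}
    {i : Int} (hc : ConsD d0 d) (hf : FullD d (i - 1)) (h2 : 2 ≤ i) (hn : i ≤ n) :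
    ∃ d', stepB d i = some d' ∧ ConsD d0 d' ∧ FullD d' i := by
  by_cases hcon : d.contains i = true
  · refine ⟨d, by simp [stepB, hcon], hc, ?_⟩
    intro k hk2 hki
    by_cases hk : k = i
    · subst hk
      rw [PySem.Dict.contains_eq_isSome_get?] at hcon
      exact hcon
    · exact hf k hk2 (by omega)
  · have hgi : d.get? i = none := by
      cases h : d.get? i with
      | none => rfl
      | some w => rw [PySem.Dict.contains_eq_isSome_get?, h] at hcon; simp at hcon
    have h0 : d0.get? i = none := by
      rcases hc i with heq | ⟨w, g, hw, _, _, _⟩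
      · rw [← heq]; exact hgi
      · rw [hw] at hgi; simp at hgi
    obtain ⟨x1, hx1, g1, hv1⟩ := getB_ok hc hf (by omega) (by omega : i - 1 ≤ i - 1)
    obtain ⟨hx1a, hx1b⟩ := Vg_val_bounds d0 n hg (by omega) (by omega) hv1
    obtain ⟨x2, hx2, g2, hv2⟩ := getB_ok hc hf hx1a (by omega)
    obtain ⟨hx2a, hx2b⟩ := Vg_val_bounds d0 n hg (by omega) (by omega) hv2
    obtain ⟨x3, hx3, g3, hv3⟩ := getB_ok hc hf (by omega) (by omega : i - x2 ≤ i - 1)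
    obtain ⟨hx3a, hx3b⟩ := Vg_val_bounds d0 n hg (by omega) (by omega) hv3
    have hne1 : ¬ i = 1 := by omega
    have hvm : Vg d0 (max g1 (max g2 g3) + 1) i = some (1 + x3) := by
      have e1 : Vg d0 (max g1 (max g2 g3)) (i - 1) = some x1 := Vg_mono d0 (le_max_left _ _) hv1
      have e2 : Vg d0 (max g1 (max g2 g3)) x1 = some x2 :=
        Vg_mono d0 (le_trans (le_max_left _ _) (le_max_right _ _)) hv2
      have e3 : Vg d0 (max g1 (max g2 g3)) (i - x2) = some x3 :=
        Vg_mono d0 (le_trans (le_max_right _ _) (le_max_right _ _)) hv3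
      simp only [Vg, if_neg hne1, h0, e1, e2, e3]
    refine ⟨d.insert i (1 + x3), ?_, ConsD_insert hc h2 h0 hvm, ?_⟩
    · simp only [stepB]
      rw [if_neg hcon]
      simp only [hx1, hx2, hx3]
    · intro k hk2 hki
      by_cases hk : k = i
      · subst hk; rw [PySem.Dict.get?_insert_self]; rfl
      · rw [PySem.Dict.get?_insert_of_ne _ _ hk]
        exact hf k hk2 (by omega)

theorem loopB_ok (d0 : PySem.Dict Int Int) (n : Int) (hg : GoodD d0 n) :
    ∀ j : Nat, (j : Int) ≤ n - 1 →
      ∃ d, (PySem.List.pyRange 2 (2 + (j : Int))).foldl (fun od i => od.bind (fun d => stepB d i)) (some d0) = some d ∧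
        ConsD d0 d ∧ FullD d (1 + (j : Int)) := by
  intro j
  induction j with
  | zero =>
    intro _
    refine ⟨d0, ?_, fun k => Or.inl rfl, ?_⟩
    · have e : (2 : Int) + ((0 : Nat) : Int) = 2 := by norm_num
      rw [e, show PySem.List.pyRange (2 : Int) 2 = [] from rfl]
      rfl
    · intro k hk2 hk1; exfalso; omega
  | succ j ih =>
    intro hj
    have hj' : ((j : Int) : Int) ≤ n - 1 := by push_cast at hj ⊢; omega
    obtain ⟨d, hfold, hc, hf⟩ := ih hj'
    have hrange : PySem.List.pyRange 2 (2 + ((j + 1 : Nat) : Int)) =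
        PySem.List.pyRange 2 (2 + (j : Int)) ++ [2 + (j : Int)] := by
      have e : (2 + ((j + 1 : Nat) : Int)) = (2 + (j : Int)) + 1 := by push_cast; ring
      rw [e, PySem.List.pyRange_one_succ_right (by omega)]
    have hf' : FullD d ((2 + (j : Int)) - 1) := by
      have e : (2 : Int) + (j : Int) - 1 = 1 + (j : Int) := by ring
      rw [e]; exact hf
    obtain ⟨d', hstep, hc', hfd'⟩ := stepB_ok d0 n hg hc hf' (by omega) (by push_cast at hj; omega)
    refine ⟨d', ?_, hc', ?_⟩
    · rw [hrange, List.foldl_append, hfold]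
      simp [hstep]
    · have e : (1 : Int) + ((j + 1 : Nat) : Int) = 2 + (j : Int) := by push_cast; ring
      rw [e]; exact hfd'

theorem ofList_snoc (l : List (Int × Int)) (q : Int × Int) :
    PySem.Dict.ofList (l ++ [q]) = (PySem.Dict.ofList l).insert q.1 q.2 := by
  show (l ++ [q]).foldl (fun d p => d.insert p.1 p.2) PySem.Dict.empty = _
  rw [List.foldl_append]
  rfl

theorem ofList_items_sub (l : List (Int × Int)) : ∀ p ∈ (PySem.Dict.ofList l).items, p ∈ l := by
  induction l using List.reverseRecOn with
  | nil =>
    intro p hp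
    rw [show (PySem.Dict.ofList ([] : List (Int × Int))).items = [] from rfl] at hp
    cases hp
  | append_singleton l q ih =>
    intro p hp
    rw [ofList_snoc] at hp
    rcases (PySem.Dict.mem_items_insert _ _ _ _).mp hp with h | ⟨h, _⟩
    · exact List.mem_append_right _ (by simp [h])
    · exact List.mem_append_left _ (ih p h)

theorem ofList_isSome_of_mem_keys (l : List (Int × Int)) (k : Int) (h : k ∈ l.map Prod.fst) :
    ((PySem.Dict.ofList l).get? k).isSome = true := by
  induction l using List.reverseRecOn with
  | nil => simp at h
  | append_singleton l q ih =>
    rw [ofList_snoc, PySem.Dict.get?_insert]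
    by_cases hk : k = q.1
    · simp [hk]
    · rw [if_neg hk]
      apply ih
      simp only [List.map_append, List.mem_append] at h
      rcases h with h | h
      · exact h
      · simp at h; exact absurd h hk

-- ===== VERDICT (by name: the statement is the Claim_ definition above) =====
theorem golomb_memoization_spec : Claim_equal_golomb_memoization := by
  intro n map _hdom hpre
  unfold Spec_golomb_memoization
  by_cases hn1 : n = 1
  · subst hn1
    norm_num [golomb_memoization, golomb_memoization_alt, goA]
  · cases hget : (PySem.Dict.ofList map).get? n with
    | some v =>
      have hA : golomb_memoization n map = v := by
        unfold golomb_memoization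
        simp only [goA, if_neg hn1, hget]
      have hB : golomb_memoization_alt n map = v := by
        unfold golomb_memoization_alt
        simp only [if_neg hn1, hget]
      rw [hA, hB]
    | none =>
      have hkeys : n ∉ map.map Prod.fst := by
        intro hmem
        have := ofList_isSome_of_mem_keys map n hmem
        rw [hget] at this
        simp at this
      rcases hpre with hmem | ⟨h1, hb⟩
      · exact absurd hmem hkeys
      have h2 : 2 ≤ n := by omega
      have hgood : GoodD (PySem.Dict.ofList map) n := by
        intro k v hkv hk2 hkn
        have hp := ofList_items_sub map _ (PySem.Dict.mem_items_of_get?_eq_some _ hkv)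
        exact hb (k, v) hp hk2 hkn
      obtain ⟨v, d', hA, ⟨g, hv⟩, _⟩ :=
        A_sim (PySem.Dict.ofList map) n hgood n.toNat n n.toNat (PySem.Dict.ofList map)
          le_rfl le_rfl h1 le_rfl (fun k => Or.inl rfl)
      obtain ⟨d, hfold, hcB, hfB⟩ := loopB_ok (PySem.Dict.ofList map) n hgood (n - 1).toNat (by omega)
      have e : (2 + (((n - 1).toNat : Nat) : Int)) = n + 1 := by omega
      rw [e] at hfold
      have hsome : (d.get? n).isSome = true := hfB n h2 (by omega)
      obtain ⟨w, hw⟩ := Option.isSome_iff_exists.mp hsome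
      obtain ⟨g', hv'⟩ := lookup_Vg hcB hw h2
      have hwv : w = v := Vg_det _ hv' hv
      have hAeq : golomb_memoization n map = v := by
        unfold golomb_memoization
        rw [hA]
      have hBeq : golomb_memoization_alt n map = w := by
        unfold golomb_memoization_alt
        simp only [if_neg hn1, hget, hfold, hw]
        rfl
      rw [hAeq, hBeq, hwv]
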